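-- pv_equiv track=rewrite | github.com/aadelb/loom | src/loom/tools/research/uae_retail_intel.py | _expand_category
-- ===== SOURCE A (Python) =====
-- CATEGORY_ALIASES = {
--     "vegetables": ["vegetables", "veggies", "fresh produce", "sabzi", "khodrawat"],
--     "fruits": ["fruits", "fresh fruits", "fawakeh"],
--     "rice": ["rice", "basmati", "chawal", "arz"],
--     "oil": ["cooking oil", "vegetable oil", "sunflower oil", "zait"],
--     "spices": ["spices", "masala", "baharat", "shan", "mdh"],
--     "dairy": ["milk", "laban", "yogurt", "cheese", "dairy", "halib"],
--     "frozen": ["frozen food", "frozen chicken", "frozen vegetables"],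
--     "snacks": ["chips", "biscuits", "snacks", "namkeen", "wafers"],
--     "beverages": ["drinks", "juice", "water", "soft drinks", "mashroobat"],
--     "cleaning": ["cleaning", "detergent", "soap", "tissue"],
--     "eggs": ["eggs", "bayd", "anda"],
--     "bread": ["bread", "paratha", "roti", "khubz"],
--     "pulses": ["dal", "lentils", "chickpeas", "beans", "hububat"],
--     "flour": ["atta", "flour", "maida", "daqiq"],
--     "meat": ["meat", "chicken", "lahm", "dajaj", "gosht"],
--     "glycerin": ["glycerin", "glycerine", "glycerol", "soap base"],
-- }
--
-- def _expand_category(category: str) -> list[str]: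
--     category = category.lower().strip()
--     direct = [category]
--     for cat, aliases in CATEGORY_ALIASES.items():
--         if category in aliases or category == cat:
--             direct.append(cat)
--             if cat in ("vegetables", "fruits"):
--                 direct.append("fresh produce")
--             elif cat in ("rice", "flour", "pulses"):
--                 direct.append("dry_goods")
--             elif cat in ("spices",):
--                 direct.append("dry_goods")
--     return list(set(direct))
-- ===== SOURCE B (Python) =====
-- # Flattened reverse-lookup table: every canonical name and alias mapped to its
-- # category (no alias is shared between categories, so one entry each is exact).
-- _CATEGORY_OF = {
--     "vegetables": "vegetables",
--     "veggies": "vegetables",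
--     "fresh produce": "vegetables",
--     "sabzi": "vegetables",
--     "khodrawat": "vegetables",
--     "fruits": "fruits",
--     "fresh fruits": "fruits",
--     "fawakeh": "fruits",
--     "rice": "rice",
--     "basmati": "rice",
--     "chawal": "rice",
--     "arz": "rice",
--     "oil": "oil",
--     "cooking oil": "oil",
--     "vegetable oil": "oil",
--     "sunflower oil": "oil",
--     "zait": "oil",
--     "spices": "spices",
--     "masala": "spices",
--     "baharat": "spices",
--     "shan": "spices",
--     "mdh": "spices",
--     "dairy": "dairy",
--     "milk": "dairy",
--     "laban": "dairy",
--     "yogurt": "dairy",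
--     "cheese": "dairy",
--     "halib": "dairy",
--     "frozen": "frozen",
--     "frozen food": "frozen",
--     "frozen chicken": "frozen",
--     "frozen vegetables": "frozen",
--     "snacks": "snacks",
--     "chips": "snacks",
--     "biscuits": "snacks",
--     "namkeen": "snacks",
--     "wafers": "snacks",
--     "beverages": "beverages",
--     "drinks": "beverages",
--     "juice": "beverages",
--     "water": "beverages",
--     "soft drinks": "beverages",
--     "mashroobat": "beverages",
--     "cleaning": "cleaning",
--     "detergent": "cleaning",
--     "soap": "cleaning",
--     "tissue": "cleaning",
--     "eggs": "eggs",
--     "bayd": "eggs",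
--     "anda": "eggs",
--     "bread": "bread",
--     "paratha": "bread",
--     "roti": "bread",
--     "khubz": "bread",
--     "pulses": "pulses",
--     "dal": "pulses",
--     "lentils": "pulses",
--     "chickpeas": "pulses",
--     "beans": "pulses",
--     "hububat": "pulses",
--     "flour": "flour",
--     "atta": "flour",
--     "maida": "flour",
--     "daqiq": "flour",
--     "meat": "meat",
--     "chicken": "meat",
--     "lahm": "meat",
--     "dajaj": "meat",
--     "gosht": "meat",
--     "glycerin": "glycerin",
--     "glycerine": "glycerin",
--     "glycerol": "glycerin",
--     "soap base": "glycerin",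
-- }
--
-- # extra group tag appended for some categories
-- _GROUP_TAG = {
--     "vegetables": "fresh produce",
--     "fruits": "fresh produce",
--     "rice": "dry_goods",
--     "flour": "dry_goods",
--     "pulses": "dry_goods",
--     "spices": "dry_goods",
-- }
--
--
-- def _expand_category(category: str) -> list[str]:
--     norm = category.lower().strip()
--     names = {norm}
--     cat = _CATEGORY_OF.get(norm)
--     if cat is not None:
--         names.add(cat)
--         tag = _GROUP_TAG.get(cat)
--         if tag is not None:
--             names.add(tag)
--     return list(names)
-- ===== Notes on version B (the rewrite author's own statement) =====
-- stated objective: idiomatic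
-- what changed: A scans all 16 categories on every call, testing list membership and re-deciding the group tag with an if/elif chain; B flattens the alias table once into a literal reverse-lookup dict (every canonical name and alias -> its category, exact because no alias is shared between categories) plus a group-tag dict, so each call is a single dict lookup instead of a scan.
import Mathlib
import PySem

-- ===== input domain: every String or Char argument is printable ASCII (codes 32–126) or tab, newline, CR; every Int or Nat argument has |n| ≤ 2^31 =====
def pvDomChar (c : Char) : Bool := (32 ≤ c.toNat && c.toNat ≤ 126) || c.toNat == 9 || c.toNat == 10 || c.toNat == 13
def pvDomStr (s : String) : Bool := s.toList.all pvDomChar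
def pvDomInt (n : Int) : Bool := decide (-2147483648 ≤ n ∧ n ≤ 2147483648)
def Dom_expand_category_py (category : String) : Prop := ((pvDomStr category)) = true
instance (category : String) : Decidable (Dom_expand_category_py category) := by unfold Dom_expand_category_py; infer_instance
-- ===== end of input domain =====

-- B replaces A's per-call scan of all categories by a flattened literal reverse-lookup
-- dict plus a group-tag dict (idiomatic; one lookup per call); returned lists are
-- compared as sets (list(set(...)) iteration order is not modelled).

-- ===== PORT A =====
-- CATEGORY_ALIASES (module constant of Source A)
def pvTable : List (String × List String) :=
  [("vegetables", ["vegetables", "veggies", "fresh produce", "sabzi", "khodrawat"]),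
   ("fruits", ["fruits", "fresh fruits", "fawakeh"]),
   ("rice", ["rice", "basmati", "chawal", "arz"]),
   ("oil", ["cooking oil", "vegetable oil", "sunflower oil", "zait"]),
   ("spices", ["spices", "masala", "baharat", "shan", "mdh"]),
   ("dairy", ["milk", "laban", "yogurt", "cheese", "dairy", "halib"]),
   ("frozen", ["frozen food", "frozen chicken", "frozen vegetables"]),
   ("snacks", ["chips", "biscuits", "snacks", "namkeen", "wafers"]),
   ("beverages", ["drinks", "juice", "water", "soft drinks", "mashroobat"]),
   ("cleaning", ["cleaning", "detergent", "soap", "tissue"]),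
   ("eggs", ["eggs", "bayd", "anda"]),
   ("bread", ["bread", "paratha", "roti", "khubz"]),
   ("pulses", ["dal", "lentils", "chickpeas", "beans", "hububat"]),
   ("flour", ["atta", "flour", "maida", "daqiq"]),
   ("meat", ["meat", "chicken", "lahm", "dajaj", "gosht"]),
   ("glycerin", ["glycerin", "glycerine", "glycerol", "soap base"])]

def expand_category_py (category : String) : List String :=
  let category := PySem.Str.strip (PySem.Str.lower category)
  let direct : List String := [category]
  let direct := pvTable.foldl (fun direct p =>
    if p.2.contains category || category == p.1 then
      let direct := direct ++ [p.1]
      if p.1 == "vegetables" || p.1 == "fruits" then direct ++ ["fresh produce"]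
      else if p.1 == "rice" || p.1 == "flour" || p.1 == "pulses" then direct ++ ["dry_goods"]
      else if p.1 == "spices" then direct ++ ["dry_goods"]
      else direct
    else direct) direct
  PySem.Set.ofList direct

-- ===== PORT B =====
-- _CATEGORY_OF (literal dict in Source B: every canonical name and alias -> its category)
def pvCategoryOf : PySem.Dict String String :=
  PySem.Dict.ofList
  [   ("vegetables", "vegetables"),
   ("veggies", "vegetables"),
   ("fresh produce", "vegetables"),
   ("sabzi", "vegetables"),
   ("khodrawat", "vegetables"),
   ("fruits", "fruits"),
   ("fresh fruits", "fruits"),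
   ("fawakeh", "fruits"),
   ("rice", "rice"),
   ("basmati", "rice"),
   ("chawal", "rice"),
   ("arz", "rice"),
   ("oil", "oil"),
   ("cooking oil", "oil"),
   ("vegetable oil", "oil"),
   ("sunflower oil", "oil"),
   ("zait", "oil"),
   ("spices", "spices"),
   ("masala", "spices"),
   ("baharat", "spices"),
   ("shan", "spices"),
   ("mdh", "spices"),
   ("dairy", "dairy"),
   ("milk", "dairy"),
   ("laban", "dairy"),
   ("yogurt", "dairy"),
   ("cheese", "dairy"),
   ("halib", "dairy"),
   ("frozen", "frozen"),
   ("frozen food", "frozen"),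
   ("frozen chicken", "frozen"),
   ("frozen vegetables", "frozen"),
   ("snacks", "snacks"),
   ("chips", "snacks"),
   ("biscuits", "snacks"),
   ("namkeen", "snacks"),
   ("wafers", "snacks"),
   ("beverages", "beverages"),
   ("drinks", "beverages"),
   ("juice", "beverages"),
   ("water", "beverages"),
   ("soft drinks", "beverages"),
   ("mashroobat", "beverages"),
   ("cleaning", "cleaning"),
   ("detergent", "cleaning"),
   ("soap", "cleaning"),
   ("tissue", "cleaning"),
   ("eggs", "eggs"),
   ("bayd", "eggs"),
   ("anda", "eggs"),
   ("bread", "bread"),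
   ("paratha", "bread"),
   ("roti", "bread"),
   ("khubz", "bread"),
   ("pulses", "pulses"),
   ("dal", "pulses"),
   ("lentils", "pulses"),
   ("chickpeas", "pulses"),
   ("beans", "pulses"),
   ("hububat", "pulses"),
   ("flour", "flour"),
   ("atta", "flour"),
   ("maida", "flour"),
   ("daqiq", "flour"),
   ("meat", "meat"),
   ("chicken", "meat"),
   ("lahm", "meat"),
   ("dajaj", "meat"),
   ("gosht", "meat"),
   ("glycerin", "glycerin"),
   ("glycerine", "glycerin"),
   ("glycerol", "glycerin"),
   ("soap base", "glycerin")]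

-- _GROUP_TAG (literal dict in Source B)
def pvGroupTag : PySem.Dict String String :=
  PySem.Dict.ofList
  [("vegetables", "fresh produce"), ("fruits", "fresh produce"),
   ("rice", "dry_goods"), ("flour", "dry_goods"), ("pulses", "dry_goods"),
   ("spices", "dry_goods")]

def expand_category_py_alt (category : String) : List String :=
  let norm := PySem.Str.strip (PySem.Str.lower category)
  let names : PySem.Set String := PySem.Set.ofList [norm]
  match PySem.Dict.get? pvCategoryOf norm with
  | none => names
  | some cat =>
    let names := PySem.Set.add names cat
    match PySem.Dict.get? pvGroupTag cat with
    | some tag => PySem.Set.add names tag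
    | none => names

-- ===== PRECONDITION & SPEC =====
def Spec_expand_category_py (category : String) (out : List String) : Prop := out = expand_category_py_alt category
instance (category : String) (out : List String) : Decidable (Spec_expand_category_py category out) := by unfold Spec_expand_category_py; infer_instance

-- ===== CLAIM (what is proved, stated in full; the proofs are below) =====
def Claim_equal_expand_category_py : Prop := ∀ (category : String), Dom_expand_category_py category → Spec_expand_category_py category (expand_category_py category)

-- ===== LEMMAS AND PROOFS =====

-- the keys of the reverse-lookup dict: every canonical name and alias
set_option maxRecDepth 4096 in
theorem keys_CO : PySem.Dict.keys pvCategoryOf =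
  ["vegetables", "veggies", "fresh produce", "sabzi", "khodrawat", "fruits",
     "fresh fruits", "fawakeh", "rice", "basmati", "chawal", "arz", "oil",
     "cooking oil", "vegetable oil", "sunflower oil", "zait", "spices", "masala",
     "baharat", "shan", "mdh", "dairy", "milk", "laban", "yogurt", "cheese",
     "halib", "frozen", "frozen food", "frozen chicken", "frozen vegetables",
     "snacks", "chips", "biscuits", "namkeen", "wafers", "beverages", "drinks",
     "juice", "water", "soft drinks", "mashroobat", "cleaning", "detergent",
     "soap", "tissue", "eggs", "bayd", "anda", "bread", "paratha", "roti",
     "khubz", "pulses", "dal", "lentils", "chickpeas", "beans", "hububat",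
     "flour", "atta", "maida", "daqiq", "meat", "chicken", "lahm", "dajaj",
     "gosht", "glycerin", "glycerine", "glycerol", "soap base"] := by decide

-- the two ports agree on every input: by cases on whether the normalized string is
-- one of the 73 known names (each a closed computation) or matches nothing
set_option maxRecDepth 100000 in
theorem eq_all (category : String) : expand_category_py category = expand_category_py_alt category := by
  unfold expand_category_py expand_category_py_alt
  generalize (PySem.Str.strip (PySem.Str.lower category)) = n
  by_cases h : n ∈ ["vegetables", "veggies", "fresh produce", "sabzi", "khodrawat", "fruits",
     "fresh fruits", "fawakeh", "rice", "basmati", "chawal", "arz", "oil",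
     "cooking oil", "vegetable oil", "sunflower oil", "zait", "spices", "masala",
     "baharat", "shan", "mdh", "dairy", "milk", "laban", "yogurt", "cheese",
     "halib", "frozen", "frozen food", "frozen chicken", "frozen vegetables",
     "snacks", "chips", "biscuits", "namkeen", "wafers", "beverages", "drinks",
     "juice", "water", "soft drinks", "mashroobat", "cleaning", "detergent",
     "soap", "tissue", "eggs", "bayd", "anda", "bread", "paratha", "roti",
     "khubz", "pulses", "dal", "lentils", "chickpeas", "beans", "hububat",
     "flour", "atta", "maida", "daqiq", "meat", "chicken", "lahm", "dajaj",
     "gosht", "glycerin", "glycerine", "glycerol", "soap base"]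
  · simp only [List.mem_cons, List.not_mem_nil, or_false] at h
    rcases h with rfl | rfl | rfl | rfl | rfl | rfl | rfl | rfl | rfl | rfl | rfl | rfl | rfl | rfl | rfl | rfl | rfl | rfl | rfl | rfl | rfl | rfl | rfl | rfl | rfl | rfl | rfl | rfl | rfl | rfl | rfl | rfl | rfl | rfl | rfl | rfl | rfl | rfl | rfl | rfl | rfl | rfl | rfl | rfl | rfl | rfl | rfl | rfl | rfl | rfl | rfl | rfl | rfl | rfl | rfl | rfl | rfl | rfl | rfl | rfl | rfl | rfl | rfl | rfl | rfl | rfl | rfl | rfl | rfl | rfl | rfl | rfl | rfl <;> decide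
  · have hg : PySem.Dict.get? pvCategoryOf n = none := by
      rw [PySem.Dict.get?_eq_none_iff_not_mem_keys, keys_CO]; exact h
    simp only [List.mem_cons, not_or] at h
    simp [pvTable, List.foldl_cons, List.foldl_nil, List.contains_eq_mem, List.mem_cons, h,
      PySem.Set.ofList, hg]

-- ===== VERDICT (by name: the statement is the Claim_ definition above) =====
theorem expand_category_py_spec : Claim_equal_expand_category_py := by
  intro category _
  unfold Spec_expand_category_py
  exact eq_all category
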